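-- pv_equiv track=rewrite | github.com/bermuda-ut/ml-twitter-user-loc | features.py | classicCount
-- ===== SOURCE A (Python) =====
-- def classicCount(line, feat):
--     v = [0] * len(feat)
--     for wd in line.split():
--         for i in range(0, len(feat)):
--             for fwd in feat[i]:
--                 if wd == fwd:
--                     v[i] += 1
--     return v
-- ===== SOURCE B (Python) =====
-- def classicCount(line, feat):
--     counts = {}
--     for wd in line.split():
--         counts[wd] = counts.get(wd, 0) + 1
--     return [sum(counts.get(fwd, 0) for fwd in f) for f in feat]
-- ===== Notes on version B (the rewrite author's own statement) =====
-- stated objective: alternative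
-- what changed: Replaces the triple nested loop (for each line word, scan every feature word of every category) with a single tabulation pass building a word-count dict over the line, followed by one lookup-sum pass over each feature list; avoids rescanning the feature lists per line word.
import Mathlib
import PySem

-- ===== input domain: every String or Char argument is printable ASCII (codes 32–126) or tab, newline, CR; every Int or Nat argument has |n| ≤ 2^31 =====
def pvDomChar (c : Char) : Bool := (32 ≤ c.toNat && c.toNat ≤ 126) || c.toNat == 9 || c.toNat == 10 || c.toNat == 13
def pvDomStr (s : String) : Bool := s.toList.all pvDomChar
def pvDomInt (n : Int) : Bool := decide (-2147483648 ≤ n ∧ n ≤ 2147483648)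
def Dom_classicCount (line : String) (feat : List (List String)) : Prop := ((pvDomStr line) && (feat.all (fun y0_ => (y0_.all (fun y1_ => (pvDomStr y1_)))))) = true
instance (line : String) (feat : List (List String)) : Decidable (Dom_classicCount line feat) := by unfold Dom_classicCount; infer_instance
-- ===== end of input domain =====

-- B replaces A's triple nested scan (every feature word rescanned per line word) by one
-- tabulation pass over the line's words followed by one lookup-sum pass over the feature lists.

-- ===== PORT A =====
-- v[i] += 1 is List.modify; i comes from range(0, len(feat)) so it is a nonnegative
-- in-range index: i.toNat is exact there, and pyGetD feat i [] never hits its default.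
def classicCount (line : String) (feat : List (List String)) : List Int :=
  let v : List Int := List.replicate feat.length 0
  (PySem.Str.split₀ line).foldl
    (fun v wd =>
      (PySem.List.pyRange 0 (feat.length : Int) 1).foldl
        (fun v i =>
          (PySem.List.pyGetD feat i []).foldl
            (fun v fwd => if wd == fwd then v.modify i.toNat (· + 1) else v) v)
        v)
    v

-- ===== PORT B =====
def classicCount_alt (line : String) (feat : List (List String)) : List Int :=
  let counts : PySem.Dict String Int :=
    (PySem.Str.split₀ line).foldl (fun d wd => d.insert wd (d.getD wd 0 + 1)) PySem.Dict.empty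
  feat.map (fun f => f.foldl (fun s fwd => s + counts.getD fwd 0) 0)

-- ===== PRECONDITION & SPEC =====
def Spec_classicCount (line : String) (feat : List (List String)) (out : List Int) : Prop := out = classicCount_alt line feat
instance (line : String) (feat : List (List String)) (out : List Int) : Decidable (Spec_classicCount line feat out) := by unfold Spec_classicCount; infer_instance

-- ===== CLAIM (what is proved, stated in full; the proofs are below) =====
def Claim_equal_classicCount : Prop := ∀ (line : String) (feat : List (List String)), Dom_classicCount line feat → Spec_classicCount line feat (classicCount line feat)

-- ===== LEMMAS AND PROOFS =====

theorem modify_modify (v : List Int) (i : Nat) (a b : Int) :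
    (v.modify i (· + a)).modify i (· + b) = v.modify i (· + (a + b)) := by
  apply List.ext_getElem?
  intro j
  simp [List.getElem?_modify]
  cases v[j]? <;> simp
  split <;> simp [add_assoc]

-- inner loop: 'for fwd in f: if wd == fwd: v[i] += 1' adds f.count wd to v[i]
theorem inner_loop (f : List String) (wd : String) :
    ∀ (v : List Int) (i : Nat),
      f.foldl (fun v fwd => if wd == fwd then v.modify i (· + 1) else v) v
        = v.modify i (· + (f.count wd : Int)) := by
  induction f with
  | nil => intro v i; simp [List.count_nil]; exact (List.modify_id i v).symm
  | cons a f ih =>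
    intro v i
    simp only [List.foldl_cons, List.count_cons]
    by_cases h : wd = a
    · subst h
      rw [if_pos (by simp), ih, modify_modify]
      congr 1; funext x; simp; ring
    · rw [if_neg (by simp [h]), ih]
      congr 2
      simp [Ne.symm h]

-- middle loop over range m: each index modified once; read elementwise
theorem range_fold_get (g : Nat → Int) :
    ∀ (m : Nat) (v : List Int) (j : Nat),
      ((List.range m).foldl (fun v k => v.modify k (· + g k)) v)[j]?
        = if j < m then v[j]?.map (· + g j) else v[j]? := by
  intro m
  induction m with
  | zero => intro v j; simp
  | succ m ih =>
    intro v j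
    simp only [List.range_succ, List.foldl_append, List.foldl_cons, List.foldl_nil]
    rw [List.getElem?_modify, ih]
    by_cases hjm : j < m
    · have h1 : ¬ (m = j) := by omega
      have h2 : j < m + 1 := by omega
      simp only [h2, if_pos, hjm]
      cases v[j]? <;> simp [h1]
    · by_cases hj : j = m
      · subst hj
        simp only [hjm, if_neg, Nat.lt_succ_self, if_pos, not_false_iff]
        cases v[j]? <;> simp
      · have h1 : ¬ j < m + 1 := by omega
        have h2 : m ≠ j := by omega
        simp only [h1, hjm, if_neg, not_false_iff]
        cases v[j]? <;> simp [h2]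

-- one word of A's outer loop, read elementwise
theorem step_get (feat : List (List String)) (wd : String) (v : List Int) (j : Nat) :
    ((PySem.List.pyRange 0 (feat.length : Int) 1).foldl
        (fun v i =>
          (PySem.List.pyGetD feat i []).foldl
            (fun v fwd => if wd == fwd then v.modify i.toNat (· + 1) else v) v) v)[j]?
      = if j < feat.length then v[j]?.map (· + ((feat.getD j []).count wd : Int)) else v[j]? := by
  rw [PySem.List.pyRange_zero_nat, List.foldl_map]
  have hfun : (fun (v : List Int) (k : Nat) =>
      (PySem.List.pyGetD feat (k : Int) []).foldl
        (fun v fwd => if wd == fwd then v.modify (k : Int).toNat (· + 1) else v) v)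
      = fun (v : List Int) (k : Nat) => v.modify k (· + ((feat.getD k []).count wd : Int)) := by
    funext v k
    rw [PySem.List.pyGetD_natCast]
    simp only [Int.toNat_natCast]
    exact inner_loop _ wd v k
  rw [hfun, range_fold_get]

-- A's whole loop nest, read elementwise
theorem outer_get (feat : List (List String)) :
    ∀ (ws : List String) (v : List Int) (j : Nat),
      ((ws.foldl
          (fun v wd =>
            (PySem.List.pyRange 0 (feat.length : Int) 1).foldl
              (fun v i =>
                (PySem.List.pyGetD feat i []).foldl
                  (fun v fwd => if wd == fwd then v.modify i.toNat (· + 1) else v) v) v)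
          v))[j]?
        = if j < feat.length
            then v[j]?.map (· + (ws.map (fun wd => ((feat.getD j []).count wd : Int))).sum)
            else v[j]? := by
  intro ws
  induction ws with
  | nil => intro v j; by_cases h : j < feat.length <;> simp [h]
  | cons wd ws ih =>
    intro v j
    simp only [List.foldl_cons, List.map_cons, List.sum_cons]
    rw [ih]
    by_cases hj : j < feat.length
    · simp only [hj, if_pos]
      rw [step_get]
      simp only [hj, if_pos]
      cases v[j]? <;> simp
      ring
    · simp only [hj, if_neg, not_false_iff]
      rw [step_get]
      simp [hj]

-- double counting: Σ_{wd ∈ ws} count_f(wd) = Σ_{fwd ∈ f} count_ws(fwd)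
theorem sum_swap (ws : List String) :
    ∀ (f : List String),
      (ws.map (fun wd => (f.count wd : Int))).sum
        = (f.map (fun fwd => (ws.count fwd : Int))).sum := by
  intro f
  induction f with
  | nil => simp
  | cons a f ih =>
    simp only [List.map_cons, List.sum_cons]
    have hmap : (ws.map (fun wd => (((a :: f).count wd : Nat) : Int)))
        = ws.map (fun wd => (f.count wd : Int) + (if a == wd then 1 else 0)) := by
      apply List.map_congr_left
      intro wd _
      rw [List.count_cons]
      split <;> simp
    rw [hmap, PySem.List.sum_map_add_int, ih, PySem.List.sum_map_ite_one_zero]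
    have hcnt : ws.countP (fun wd => a == wd) = ws.count a := by
      unfold List.count
      congr 1
      funext wd
      simp [eq_comm]
    rw [hcnt]; ring

theorem main_eq (line : String) (feat : List (List String)) :
    classicCount line feat = classicCount_alt line feat := by
  unfold classicCount classicCount_alt
  have halt : feat.map (fun f => f.foldl (fun s fwd => s +
      (((PySem.Str.split₀ line).foldl (fun d wd => d.insert wd (d.getD wd 0 + 1)) PySem.Dict.empty).getD fwd 0)) 0)
      = feat.map (fun f => ((PySem.Str.split₀ line).map (fun wd => (f.count wd : Int))).sum) := by
    apply List.map_congr_left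
    intro f _
    have hfn : (fun (s : Int) (fwd : String) => s +
        (((PySem.Str.split₀ line).foldl (fun d wd => d.insert wd (d.getD wd 0 + 1)) PySem.Dict.empty).getD fwd 0))
        = fun s fwd => s + (((PySem.Str.split₀ line).count fwd : Nat) : Int) := by
      funext s fwd
      rw [PySem.Dict.getD_foldl_insert_add_one, PySem.Dict.getD_empty]
      ring
    rw [hfn, PySem.List.foldl_add, ← sum_swap]
    simp
  rw [halt]
  apply List.ext_getElem?
  intro j
  rw [outer_get]
  by_cases hj : j < feat.length
  · simp only [hj, if_pos]
    rw [List.getElem?_map, List.getElem?_replicate]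
    simp only [hj, if_pos]
    rw [List.getElem?_eq_getElem hj]
    simp only [Option.map_some]
    congr 1
    rw [List.getD_eq_getElem _ _ hj]
    ring
  · simp only [hj, if_neg, not_false_iff]
    rw [List.getElem?_map]
    have h1 : feat.length ≤ j := by omega
    simp [h1]

-- ===== VERDICT (by name: the statement is the Claim_ definition above) =====
theorem classicCount_spec : Claim_equal_classicCount := by
  intro line feat _
  exact main_eq line feat
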